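-- pv_equiv track=rewrite | github.com/careercup/CtCI-6th-Edition-Python | chapter_08/p11_coins.py | coin_combinations
-- ===== SOURCE A (Python) =====
-- STANDARD_COIN_SIZES = [1, 5, 10, 20, 25]
--
-- def coin_combinations(amount, coin_sizes=None):
--     if amount == 0:
--         return 1
--     if amount < 0:
--         return 0
--     if coin_sizes is None:
--         coin_sizes = STANDARD_COIN_SIZES
--
--     if len(coin_sizes) == 0:
--         return 0
--     m = len(coin_sizes)
--     return coin_combinations(amount, coin_sizes[: m - 1]) + coin_combinations(
--         amount - coin_sizes[m - 1], coin_sizes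
--     )
-- ===== SOURCE B (Python) =====
-- STANDARD_COIN_SIZES = [1, 5, 10, 20, 25]
--
--
-- def coin_combinations(amount, coin_sizes=None):
--     if amount == 0:
--         return 1
--     if amount < 0:
--         return 0
--     if coin_sizes is None:
--         coin_sizes = STANDARD_COIN_SIZES
--     dp = [1] + [0] * amount
--     for c in coin_sizes:
--         for x in range(c, amount + 1):
--             dp[x] += dp[x - c]
--     return dp[amount]
-- ===== Notes on version B (the rewrite author's own statement) =====
-- stated objective: faster
-- what changed: Replaces A's exponential two-branch recursion (drop last coin / subtract last coin) by a bottom-up dynamic-programming row dp[0..amount] updated in place once per coin, reading off dp[amount].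
import Mathlib
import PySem

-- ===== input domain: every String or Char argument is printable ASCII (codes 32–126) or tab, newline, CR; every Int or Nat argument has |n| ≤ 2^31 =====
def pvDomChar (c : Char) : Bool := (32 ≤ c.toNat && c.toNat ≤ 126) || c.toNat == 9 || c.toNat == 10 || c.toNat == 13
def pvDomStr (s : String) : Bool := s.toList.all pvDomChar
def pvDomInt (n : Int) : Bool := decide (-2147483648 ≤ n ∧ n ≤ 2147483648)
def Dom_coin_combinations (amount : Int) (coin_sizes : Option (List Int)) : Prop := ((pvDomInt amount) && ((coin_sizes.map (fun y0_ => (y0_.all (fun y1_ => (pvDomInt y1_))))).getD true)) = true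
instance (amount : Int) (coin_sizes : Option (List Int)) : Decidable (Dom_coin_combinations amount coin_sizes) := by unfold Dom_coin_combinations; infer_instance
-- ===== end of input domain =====

-- B replaces A's exponential last-coin recursion by the classic bottom-up DP over amounts
-- (one in-place row, coins processed left to right); return value only, no argument is mutated.

-- ===== PORT A =====
def STANDARD_COIN_SIZES : List Int := [1, 5, 10, 20, 25]

-- A's recursion, with a fuel parameter that only makes the computation total in Lean
-- (Pre_ guarantees the Python recursion terminates; the fuel supplied below is then enough).
def coinRecA : Nat → Int → List Int → Int
  | 0, _, _ => 0
  | fuel + 1, amount, coins =>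
    if amount = 0 then 1
    else if amount < 0 then 0
    else if coins.length = 0 then 0
    else
      coinRecA fuel amount (PySem.List.slice coins none (some ((coins.length : Int) - 1))) +
      coinRecA fuel (amount - PySem.List.pyGetD coins ((coins.length : Int) - 1) 0) coins

def coin_combinations (amount : Int) (coin_sizes : Option (List Int)) : Int :=
  let coins := coin_sizes.getD STANDARD_COIN_SIZES
  coinRecA (amount.toNat + coins.length + 1) amount coins

-- ===== PORT B =====
-- dp is a Python list of ints, ported as a Lean Array (O(1) index/update as in Python);
-- all indices are non-negative inside Pre_, so .toNat is exact there.
-- dp[x] += dp[x - c]  (one inner-loop step of Source B)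
def dpStep (c : Int) (dp : Array Int) (x : Int) : Array Int :=
  dp.set! x.toNat (dp.getD x.toNat 0 + dp.getD (x - c).toNat 0)

-- for x in range(c, amount + 1): dp[x] += dp[x - c]
def dpCoin (amount : Int) (dp : Array Int) (c : Int) : Array Int :=
  (PySem.List.pyRange c (amount + 1) 1).foldl (dpStep c) dp

def coin_combinations_alt (amount : Int) (coin_sizes : Option (List Int)) : Int :=
  if amount = 0 then 1
  else if amount < 0 then 0
  else
    let coins := coin_sizes.getD STANDARD_COIN_SIZES
    let dp := coins.foldl (dpCoin amount) (#[1] ++ Array.replicate amount.toNat 0)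
    dp.getD amount.toNat 0

-- ===== PRECONDITION & SPEC =====
-- Pre_ excludes exactly the inputs on which the Python A never returns (RecursionError):
-- a positive amount together with a coin list containing a coin ≤ 0.
def Pre_coin_combinations (amount : Int) (coin_sizes : Option (List Int)) : Prop :=
  amount ≤ 0 ∨ ∀ c ∈ coin_sizes.getD STANDARD_COIN_SIZES, 0 < c
instance (amount : Int) (coin_sizes : Option (List Int)) : Decidable (Pre_coin_combinations amount coin_sizes) := by unfold Pre_coin_combinations; infer_instance

def pvWitness_coin_combinations : Int × Option (List Int) := (10, none)

def Spec_coin_combinations (amount : Int) (coin_sizes : Option (List Int)) (out : Int) : Prop := out = coin_combinations_alt amount coin_sizes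
instance (amount : Int) (coin_sizes : Option (List Int)) (out : Int) : Decidable (Spec_coin_combinations amount coin_sizes out) := by unfold Spec_coin_combinations; infer_instance

-- ===== CLAIM (what is proved, stated in full; the proofs are below) =====
def Claim_equal_coin_combinations : Prop := ∀ (amount : Int) (coin_sizes : Option (List Int)), Dom_coin_combinations amount coin_sizes → Pre_coin_combinations amount coin_sizes → Spec_coin_combinations amount coin_sizes (coin_combinations amount coin_sizes)

-- ===== LEMMAS AND PROOFS =====

-- List-level mirrors of B's Array helpers (the proofs run on lists, bridged by toList)
def dpStepL (c : Int) (dp : List Int) (x : Int) : List Int :=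
  dp.set x.toNat (dp.getD x.toNat 0 + dp.getD (x - c).toNat 0)

def dpCoinL (amount : Int) (dp : List Int) (c : Int) : List Int :=
  (PySem.List.pyRange c (amount + 1) 1).foldl (dpStepL c) dp

-- canonical value of A's recursion (fuel large enough)
def cnt (x : Int) (cs : List Int) : Int := coinRecA (x.toNat + cs.length + 1) x cs

lemma coinRecA_concat (f : Nat) (x c : Int) (cs : List Int) (hx : 0 < x) :
    coinRecA (f + 1) x (cs ++ [c]) = coinRecA f x cs + coinRecA f (x - c) (cs ++ [c]) := by
  have hb : (((cs ++ [c]).length : Int) - 1) = ((cs.length : Nat) : Int) := by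
    simp
  have hsl : PySem.List.slice (cs ++ [c]) none (some (((cs ++ [c]).length : Int) - 1)) = cs := by
    rw [hb, PySem.List.slice_to_natCast]
    simp
  have hlast : PySem.List.pyGetD (cs ++ [c]) (((cs ++ [c]).length : Int) - 1) 0 = c := by
    rw [hb, PySem.List.pyGetD_natCast]
    simp [List.getD]
  rw [coinRecA, hsl, hlast]
  simp
  omega

lemma coinRecA_stable : ∀ fuel (x : Int) (cs : List Int), (∀ c ∈ cs, 0 < c) →
    x.toNat + cs.length < fuel → coinRecA fuel x cs = cnt x cs := by
  intro fuel
  induction fuel using Nat.strong_induction_on with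
  | _ fuel ih =>
    intro x cs hpos hlt
    match fuel, hlt with
    | f + 1, hlt =>
    by_cases h0 : x = 0
    · subst h0; simp [coinRecA, cnt]
    · by_cases hneg : x < 0
      · rw [coinRecA]
        unfold cnt
        rw [coinRecA]
        simp [h0, hneg]
      · rcases List.eq_nil_or_concat' cs with rfl | ⟨cs', c, rfl⟩
        · rw [coinRecA]
          unfold cnt
          rw [coinRecA]
          simp [h0, hneg]
        · have hx : 0 < x := by omega
          have hc : 0 < c := hpos c (by simp)
          have hlen : (cs' ++ [c]).length = cs'.length + 1 := by simp
          have hpos' : ∀ a ∈ cs', 0 < a := fun a ha => hpos a (by simp [ha])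
          rw [coinRecA_concat f x c cs' hx]
          unfold cnt
          rw [hlen]
          rw [show x.toNat + (cs'.length + 1) + 1 = (x.toNat + cs'.length + 1) + 1 from by omega]
          rw [coinRecA_concat (x.toNat + cs'.length + 1) x c cs' hx]
          have hxc : (x - c).toNat < x.toNat := by omega
          rw [ih f (by omega) x cs' hpos' (by omega),
              ih f (by omega) (x - c) (cs' ++ [c]) hpos (by simp; omega),
              ih (x.toNat + cs'.length + 1) (by omega) x cs' hpos' (by omega),
              ih (x.toNat + cs'.length + 1) (by omega) (x - c) (cs' ++ [c]) hpos (by simp; omega)]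

lemma cnt_zero (cs : List Int) : cnt 0 cs = 1 := by
  simp [cnt, coinRecA]

lemma cnt_neg (x : Int) (cs : List Int) (h : x < 0) : cnt x cs = 0 := by
  simp [cnt, coinRecA]; omega

lemma cnt_nil (x : Int) (h : 0 < x) : cnt x [] = 0 := by
  simp [cnt, coinRecA]; omega

lemma cnt_append (x c : Int) (cs : List Int) (hpos : ∀ a ∈ cs ++ [c], 0 < a) (hx : 0 < x) :
    cnt x (cs ++ [c]) = cnt x cs + cnt (x - c) (cs ++ [c]) := by
  have hc : 0 < c := hpos c (by simp)
  have hpos' : ∀ a ∈ cs, 0 < a := fun a ha => hpos a (by simp [ha])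
  have h1 : cnt x (cs ++ [c]) = coinRecA ((x.toNat + cs.length + 1) + 1) x (cs ++ [c]) := by
    unfold cnt
    congr 1
    simp
    omega
  rw [h1, coinRecA_concat _ x c cs hx,
      coinRecA_stable _ x cs hpos' (by omega),
      coinRecA_stable _ (x - c) (cs ++ [c]) hpos (by simp; omega)]

lemma cnt_lt (x c : Int) (cs : List Int) (hpos : ∀ a ∈ cs ++ [c], 0 < a)
    (h0 : 0 ≤ x) (hxc : x < c) : cnt x (cs ++ [c]) = cnt x cs := by
  rcases eq_or_lt_of_le h0 with h | h
  · rw [← h, cnt_zero, cnt_zero]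
  · rw [cnt_append x c cs hpos h, cnt_neg (x - c) _ (by omega)]; ring

-- invariant of B's dp row
def DpInv (amount : Int) (cs : List Int) (dp : List Int) : Prop :=
  dp.length = amount.toNat + 1 ∧ ∀ i : Nat, i ≤ amount.toNat → dp.getD i 0 = cnt (i : Int) cs

lemma dpCoin_inv (amount c : Int) (cs dp : List Int) (ha : 0 < amount)
    (hpos : ∀ a ∈ cs ++ [c], 0 < a) (hdp : DpInv amount cs dp) :
    DpInv amount (cs ++ [c]) (dpCoinL amount dp c) := by
  have hc : 0 < c := hpos c (by simp)
  obtain ⟨hlen, hval⟩ := hdp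
  have key : ∀ k : Nat, c + (k : Int) ≤ amount + 1 →
      ((PySem.List.pyRange c (c + (k : Int)) 1).foldl (dpStepL c) dp).length = amount.toNat + 1 ∧
      (∀ i : Nat, i ≤ amount.toNat → (i : Int) < c + (k : Int) →
        ((PySem.List.pyRange c (c + (k : Int)) 1).foldl (dpStepL c) dp).getD i 0 = cnt (i : Int) (cs ++ [c])) ∧
      (∀ i : Nat, i ≤ amount.toNat → c + (k : Int) ≤ (i : Int) →
        ((PySem.List.pyRange c (c + (k : Int)) 1).foldl (dpStepL c) dp).getD i 0 = cnt (i : Int) cs) := by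
    intro k
    induction k with
    | zero =>
      intro _
      rw [show c + ((0 : Nat) : Int) = c from by push_cast; ring,
          PySem.List.pyRange_one_eq_nil (le_refl c)]
      refine ⟨hlen, ?_, ?_⟩
      · intro i hi hic
        rw [List.foldl_nil, hval i hi, cnt_lt (i : Int) c cs hpos (by omega) (by omega)]
      · intro i hi _
        rw [List.foldl_nil, hval i hi]
    | succ k ih =>
      intro hk1
      have hck : c + ((k : Nat) : Int) ≤ amount + 1 := by push_cast at hk1 ⊢; omega
      obtain ⟨ihl, ih1, ih2⟩ := ih hck
      set t : Int := c + (k : Int) with hteq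
      have ht0 : 0 < t := by omega
      have hta : t ≤ amount := by push_cast at hk1; omega
      have htn : ((t.toNat : Nat) : Int) = t := Int.toNat_of_nonneg (by omega)
      have htnn : t.toNat ≤ amount.toNat := by omega
      have hrange : PySem.List.pyRange c (c + ((k + 1 : Nat) : Int)) 1
          = PySem.List.pyRange c t 1 ++ [t] := by
        rw [show c + ((k + 1 : Nat) : Int) = t + 1 from by push_cast; ring]
        exact PySem.List.pyRange_one_succ_right (by omega)
      set prev := (PySem.List.pyRange c t 1).foldl (dpStepL c) dp with hprev
      have hfold : (PySem.List.pyRange c (c + ((k + 1 : Nat) : Int)) 1).foldl (dpStepL c) dp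
          = dpStepL c prev t := by
        rw [hrange, List.foldl_append, List.foldl_cons, List.foldl_nil]
      have hkn : k ≤ amount.toNat := by omega
      have hget1 : prev.getD t.toNat 0 = cnt t cs := by
        have := ih2 t.toNat htnn (by omega)
        rwa [htn] at this
      have hget2 : prev.getD (t - c).toNat 0 = cnt ((k : Nat) : Int) (cs ++ [c]) := by
        rw [show (t - c).toNat = k from by omega]
        exact ih1 k hkn (by omega)
      have hnewval : cnt t cs + cnt ((k : Nat) : Int) (cs ++ [c]) = cnt t (cs ++ [c]) := by
        rw [cnt_append t c cs hpos ht0, show t - c = ((k : Nat) : Int) from by omega]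
      rw [hfold]
      unfold dpStepL
      rw [hget1, hget2, hnewval]
      refine ⟨by rw [List.length_set]; exact ihl, ?_, ?_⟩
      · intro i hi hic
        by_cases hieq : i = t.toNat
        · subst hieq
          rw [List.getD_eq_getElem?_getD, List.getElem?_set_self (by omega)]
          simp [htn]
        · rw [List.getD_eq_getElem?_getD, List.getElem?_set_ne (by omega),
              ← List.getD_eq_getElem?_getD]
          exact ih1 i hi (by push_cast at hic; omega)
      · intro i hi hic
        have hieq : i ≠ t.toNat := by push_cast at hic; omega
        rw [List.getD_eq_getElem?_getD, List.getElem?_set_ne (by omega),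
            ← List.getD_eq_getElem?_getD]
        exact ih2 i hi (by push_cast at hic; omega)
  by_cases hca : c ≤ amount + 1
  · have hk0 : c + (((amount + 1 - c).toNat : Nat) : Int) = amount + 1 := by omega
    obtain ⟨hl, h1, _⟩ := key (amount + 1 - c).toNat (by omega)
    refine ⟨?_, ?_⟩
    · unfold dpCoinL
      rw [← hk0]
      exact hl
    · intro i hi
      unfold dpCoinL
      rw [← hk0]
      exact h1 i hi (by omega)
  · unfold dpCoinL
    rw [PySem.List.pyRange_one_eq_nil (by omega), List.foldl_nil]
    refine ⟨hlen, ?_⟩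
    intro i hi
    rw [hval i hi, cnt_lt (i : Int) c cs hpos (by omega) (by omega)]

lemma foldl_dpCoin_inv (amount : Int) : ∀ (cs pre dp : List Int), 0 < amount →
    (∀ a ∈ pre ++ cs, 0 < a) → DpInv amount pre dp →
    DpInv amount (pre ++ cs) (cs.foldl (dpCoinL amount) dp) := by
  intro cs
  induction cs with
  | nil => intro pre dp _ _ h; simpa using h
  | cons c cs ih =>
    intro pre dp ha hpos hdp
    have h1 : DpInv amount (pre ++ [c]) (dpCoinL amount dp c) :=
      dpCoin_inv amount c pre dp ha (by intro a haa; exact hpos a (by simp at haa ⊢; tauto)) hdp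
    have := ih (pre ++ [c]) (dpCoinL amount dp c) ha
      (by intro a haa; exact hpos a (by simp at haa ⊢; tauto)) h1
    simpa [List.foldl] using this

lemma inv_init (amount : Int) (_ha : 0 < amount) :
    DpInv amount [] (1 :: List.replicate amount.toNat 0) := by
  constructor
  · simp
  · intro i hi
    cases i with
    | zero => simpa using (cnt_zero []).symm
    | succ j =>
      have : (1 :: List.replicate amount.toNat (0 : Int)).getD (j + 1) 0 = 0 := by
        simp [List.getD]
      rw [this, cnt_nil _ (by omega)]

-- bridge: B's Array helpers compute, through toList, exactly their List mirrors
lemma getD_toList (a : Array Int) (i : Nat) (d : Int) : a.getD i d = a.toList.getD i d := by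
  simp [Array.getD, List.getD_eq_getElem?_getD]
  split
  · rename_i h; simp [h]
  · rename_i h; rw [Array.getElem?_eq_none (by omega)]; rfl

lemma dpStep_toList (c : Int) (a : Array Int) (x : Int) :
    (dpStep c a x).toList = dpStepL c a.toList x := by
  unfold dpStep dpStepL
  rw [getD_toList, getD_toList]
  simp

lemma dpCoin_toList (amount c : Int) (a : Array Int) :
    (dpCoin amount a c).toList = dpCoinL amount a.toList c := by
  unfold dpCoin dpCoinL
  generalize PySem.List.pyRange c (amount + 1) 1 = l
  induction l generalizing a with
  | nil => rfl
  | cons x l ih => rw [List.foldl_cons, List.foldl_cons, ← dpStep_toList, ih]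

lemma foldl_dpCoin_toList (amount : Int) : ∀ (cs : List Int) (a : Array Int),
    (cs.foldl (dpCoin amount) a).toList = cs.foldl (dpCoinL amount) a.toList := by
  intro cs
  induction cs with
  | nil => intro a; rfl
  | cons c cs ih => intro a; rw [List.foldl_cons, List.foldl_cons, ih, dpCoin_toList]

-- ===== VERDICT (by name: the statement is the Claim_ definition above) =====
theorem coin_combinations_spec : Claim_equal_coin_combinations := by
  intro amount coin_sizes _ hpre
  unfold Spec_coin_combinations coin_combinations coin_combinations_alt
  by_cases h0 : amount = 0
  · subst h0
    simp [coinRecA]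
  · by_cases hneg : amount < 0
    · rw [coinRecA]
      simp [h0, hneg]
    · have ha : 0 < amount := by omega
      have hpos : ∀ c ∈ coin_sizes.getD STANDARD_COIN_SIZES, 0 < c := by
        rcases hpre with h | h
        · omega
        · exact h
      have hA : coinRecA (amount.toNat + (coin_sizes.getD STANDARD_COIN_SIZES).length + 1)
          amount (coin_sizes.getD STANDARD_COIN_SIZES) = cnt amount (coin_sizes.getD STANDARD_COIN_SIZES) :=
        coinRecA_stable _ amount _ hpos (by omega)
      have hinv := foldl_dpCoin_inv amount (coin_sizes.getD STANDARD_COIN_SIZES) []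
        (1 :: List.replicate amount.toNat 0) ha (by simpa using hpos) (inv_init amount ha)
      simp only [List.nil_append] at hinv
      obtain ⟨hl, hv⟩ := hinv
      simp only [h0, hneg, if_false]
      rw [hA, getD_toList, foldl_dpCoin_toList,
          show (#[(1 : Int)] ++ Array.replicate amount.toNat (0 : Int)).toList
              = (1 :: List.replicate amount.toNat 0 : List Int) from by simp,
          hv amount.toNat (le_refl _), Int.toNat_of_nonneg (by omega)]
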